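-- pv_equiv track=rewrite | github.com/mytechnic/DiabloUtil | StarDiablo2AdminUtils.py | isFindTargetIp
-- ===== SOURCE A (Python) =====
-- def isFindTargetIp(ipList, targetIp):
--     if not targetIp:
--         return False
--
--     if len(ipList) < 1:
--         return False
--
--     # 멀티 IP
--     ips = targetIp.split(',')
--
--     # IP 확인
--     isFind = False
--     for d2Ip in ipList:
--         for ip in ips:
--             ip = ip.strip()
--             if d2Ip == ip:
--                 isFind = True
--                 break
--         if isFind:
--             break
--
--     return isFind
-- ===== SOURCE B (Python) =====
-- def isFindTargetIp(ipList, targetIp):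
--     if not targetIp:
--         return False
--     known = set(ipList)
--     token = []
--     for ch in targetIp + ',':
--         if ch == ',':
--             if ''.join(token).strip() in known:
--                 return True
--             token = []
--         else:
--             token.append(ch)
--     return False
-- ===== Notes on version B (the rewrite author's own statement) =====
-- stated objective: alternative
-- what changed: Inverts the traversal: instead of A's nested scan of ipList against split-and-stripped parts, B streams over the characters of targetIp once, building each token by hand (no split), and tests each completed stripped token against a set of ipList built once, returning early on the first hit.
import Mathlib
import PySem

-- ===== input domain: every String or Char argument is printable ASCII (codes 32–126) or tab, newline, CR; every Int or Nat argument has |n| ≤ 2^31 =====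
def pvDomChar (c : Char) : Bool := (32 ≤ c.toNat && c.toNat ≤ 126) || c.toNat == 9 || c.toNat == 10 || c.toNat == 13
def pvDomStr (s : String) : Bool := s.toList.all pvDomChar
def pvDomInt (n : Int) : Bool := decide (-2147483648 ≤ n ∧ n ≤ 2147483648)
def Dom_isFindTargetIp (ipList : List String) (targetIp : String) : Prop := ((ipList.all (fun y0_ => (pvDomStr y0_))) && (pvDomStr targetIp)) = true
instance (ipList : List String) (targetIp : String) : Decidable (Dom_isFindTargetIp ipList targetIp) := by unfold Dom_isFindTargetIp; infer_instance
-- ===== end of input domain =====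

-- B (alternative): streams over targetIp's characters once, hand-tokenizing at commas (no split) and testing each stripped token against set(ipList), returning early; same result everywhere.
-- ===== PORT A =====
-- inner 'for ip in ips' loop: strips ip, returns true on first match (break)
def pvInnerA (d2Ip : String) (ips : List String) : Bool :=
  match ips with
  | [] => false
  | ip :: rest =>
      let ip := PySem.Str.strip ip
      if d2Ip = ip then true else pvInnerA d2Ip rest

-- outer 'for d2Ip in ipList' loop: breaks as soon as isFind is set
def pvOuterA (ipList : List String) (ips : List String) : Bool :=
  match ipList with
  | [] => false
  | d2Ip :: rest =>
      if pvInnerA d2Ip ips then true else pvOuterA rest ips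

def isFindTargetIp (ipList : List String) (targetIp : String) : Bool :=
  if targetIp = "" then false
  else if ipList.length < 1 then false
  else
    let ips := (PySem.Str.split? targetIp ",").getD []
    pvOuterA ipList ips

-- ===== PORT B =====
-- B's 'for ch in targetIp + ","' loop: token accumulates cur chars; at each comma the
-- stripped joined token is tested against the prebuilt set, with early return (True).
def pvScanB (known : PySem.Set String) (chars : List Char) (token : List Char) : Bool :=
  match chars with
  | [] => false
  | ch :: rest =>
      if ch = ',' then
        if PySem.Set.contains known (PySem.Str.strip (String.ofList token)) then true
        else pvScanB known rest []
      else pvScanB known rest (token ++ [ch])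

def isFindTargetIp_alt (ipList : List String) (targetIp : String) : Bool :=
  if targetIp = "" then false
  else
    let known := PySem.Set.ofList ipList
    pvScanB known (targetIp.toList ++ [',']) []

-- ===== PRECONDITION & SPEC =====
def Spec_isFindTargetIp (ipList : List String) (targetIp : String) (out : Bool) : Prop := out = isFindTargetIp_alt ipList targetIp
instance (ipList : List String) (targetIp : String) (out : Bool) : Decidable (Spec_isFindTargetIp ipList targetIp out) := by unfold Spec_isFindTargetIp; infer_instance

-- ===== CLAIM =====
def Claim_equal_isFindTargetIp : Prop := ∀ (ipList : List String) (targetIp : String), Dom_isFindTargetIp ipList targetIp → Spec_isFindTargetIp ipList targetIp (isFindTargetIp ipList targetIp)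

-- ===== LEMMAS AND PROOFS =====

-- reference tokenizer: comma-split with a forward accumulator (proof-only)
def pvTok (chars : List Char) (cur : List Char) : List (List Char) :=
  match chars with
  | [] => [cur]
  | c :: rest => if c = ',' then cur :: pvTok rest [] else pvTok rest (cur ++ [c])

-- splitOn with single-char ',' separator computes pvTok
lemma splitOn_go_eq (fuel : Nat) (l cur : List Char) (acc : List (List Char))
    (h : l.length < fuel) :
    PySem.Chars.splitOn.go [','] fuel l cur acc = acc.reverse ++ pvTok l cur.reverse := by
  induction fuel generalizing l cur acc with
  | zero => omega
  | succ fuel ih =>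
    cases l with
    | nil => simp [PySem.Chars.splitOn.go, pvTok]
    | cons c rest =>
      by_cases hc : c = ','
      · subst hc
        have hp : List.isPrefixOf [','] (',' :: rest) = true := by
          simp [List.isPrefixOf]
        simp only [PySem.Chars.splitOn.go, hp, if_true, List.length_cons, List.length_nil,
          List.drop_succ_cons, List.drop_zero]
        rw [ih rest [] ((cur.reverse) :: acc) (by simpa using Nat.lt_of_succ_lt_succ h)]
        simp [pvTok]
      · have hp : List.isPrefixOf [','] (c :: rest) = false := by
          simp [List.isPrefixOf]; intro h'; exact absurd h'.symm hc
        simp only [PySem.Chars.splitOn.go, hp]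
        rw [if_neg (by simp)]
        rw [ih rest (c :: cur) acc (by simpa using Nat.lt_of_succ_lt_succ h)]
        simp [pvTok, hc]

lemma splitOn_comma (l : List Char) :
    PySem.Chars.splitOn l [','] = pvTok l [] := by
  have := splitOn_go_eq (l.length + 1) l [] [] (by omega)
  simpa [PySem.Chars.splitOn] using this

-- B's scanner over (chars ++ [',']) is an any over pvTok's tokens
lemma pvScanB_eq_any (known : PySem.Set String) (chars token : List Char) :
    pvScanB known (chars ++ [',']) token
      = (pvTok chars token).any
          (fun t => PySem.Set.contains known (PySem.Str.strip (String.ofList t))) := by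
  induction chars generalizing token with
  | nil => simp [pvScanB, pvTok]
  | cons c rest ih =>
    by_cases hc : c = ','
    · subst hc
      simp only [List.cons_append, pvScanB, pvTok, ih]
      simp [List.any_cons]
    · simp [pvScanB, pvTok, hc, ih]

-- pvInnerA tests d2Ip against each stripped ip
lemma pvInnerA_eq_any (d2Ip : String) (ips : List String) :
    pvInnerA d2Ip ips = ips.any (fun ip => decide (d2Ip = PySem.Str.strip ip)) := by
  induction ips with
  | nil => rfl
  | cons ip rest ih => simp [pvInnerA, ih]

-- the outer break loop is a nested any
lemma pvOuterA_eq_any (ipList ips : List String) :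
    pvOuterA ipList ips
      = ipList.any (fun d2Ip => ips.any (fun ip => decide (d2Ip = PySem.Str.strip ip))) := by
  induction ipList with
  | nil => rfl
  | cons d rest ih =>
    simp only [pvOuterA, pvInnerA_eq_any, List.any_cons, ih]
    rcases h : ips.any (fun ip => decide (d = PySem.Str.strip ip)) with _ | _ <;> simp

-- ===== VERDICT =====
-- set(ipList) membership is list membership
lemma pvContains_ofList (xs : List String) (v : String) :
    PySem.Set.contains (PySem.Set.ofList xs) v = decide (v ∈ xs) := by
  simp [PySem.Set.contains]

theorem isFindTargetIp_spec : Claim_equal_isFindTargetIp := by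
  intro ipList targetIp _
  unfold Spec_isFindTargetIp isFindTargetIp isFindTargetIp_alt
  by_cases h1 : targetIp = ""
  · simp [h1]
  · simp only [h1, if_false]
    rw [pvScanB_eq_any]
    have hsplit : (PySem.Str.split? targetIp ",").getD []
        = (pvTok targetIp.toList []).map String.ofList := by
      simp [PySem.Str.split?, PySem.Chars.split?, splitOn_comma]
    have hswap : ∀ (xs : List String),
        (pvTok targetIp.toList []).any
            (fun t => PySem.Set.contains (PySem.Set.ofList xs) (PySem.Str.strip (String.ofList t)))
          = xs.any (fun d => ((pvTok targetIp.toList []).map String.ofList).any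
              (fun ip => decide (d = PySem.Str.strip ip))) := by
      intro xs
      rw [Bool.eq_iff_iff]
      simp only [pvContains_ofList, List.any_eq_true, List.mem_map, decide_eq_true_eq]
      constructor
      · rintro ⟨t, ht, hd⟩
        exact ⟨_, hd, _, ⟨t, ht, rfl⟩, rfl⟩
      · rintro ⟨d, hd, ip, ⟨t, ht, rfl⟩, rfl⟩
        exact ⟨t, ht, hd⟩
    rw [hswap]
    cases ipList with
    | nil => simp
    | cons a rest =>
      simp only [List.length_cons]
      rw [if_neg (by omega), hsplit, pvOuterA_eq_any]
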